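-- pv_equiv track=rewrite | github.com/SKY-Fai/P2 | services/professional_invoice_mapping_engine.py | _analyze_party_name_components
-- ===== SOURCE A (Python) =====
-- from typing import Dict, List, Tuple, Optional
--
-- def _analyze_party_name_components(party_name: str) -> Dict:
--     """Analyze party name components"""
--     # Remove business suffixes
--     business_terms = ['ltd', 'limited', 'pvt', 'private', 'company', 'corp', 'inc', 'llp']
--     words = [word for word in party_name.split() if word not in business_terms]
--
--     return {
--         'core_words': [word for word in words if len(word) > 3],
--         'short_words': [word for word in words if len(word) <= 3],
--         'business_type': [word for word in party_name.split() if word in business_terms]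
--     }
-- ===== SOURCE B (Python) =====
-- def _analyze_party_name_components(party_name: str) -> dict:
--     """Analyze party name components via a character-level scan (no split())."""
--     business_terms = {'ltd', 'limited', 'pvt', 'private', 'company', 'corp', 'inc', 'llp'}
--     core, short, btype = [], [], []
--
--     def flush(chars):
--         w = ''.join(chars)
--         if w in business_terms:
--             btype.append(w)
--         elif len(w) > 3:
--             core.append(w)
--         else:
--             short.append(w)
--
--     word = []
--     for ch in party_name:
--         if ch.isspace():
--             if word:
--                 flush(word)
--                 word = []
--         else:
--             word.append(ch)
--     if word:
--         flush(word)
--     return {'core_words': core, 'short_words': short, 'business_type': btype}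
-- ===== Notes on version B (the rewrite author's own statement) =====
-- stated objective: alternative
-- what changed: A calls split() twice and makes three separate filtering comprehensions over the word list; B never calls split(): it tokenizes the string itself in one character-level scan, classifying each word into one of three accumulator buckets the moment a whitespace boundary ends it.
import Mathlib
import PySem

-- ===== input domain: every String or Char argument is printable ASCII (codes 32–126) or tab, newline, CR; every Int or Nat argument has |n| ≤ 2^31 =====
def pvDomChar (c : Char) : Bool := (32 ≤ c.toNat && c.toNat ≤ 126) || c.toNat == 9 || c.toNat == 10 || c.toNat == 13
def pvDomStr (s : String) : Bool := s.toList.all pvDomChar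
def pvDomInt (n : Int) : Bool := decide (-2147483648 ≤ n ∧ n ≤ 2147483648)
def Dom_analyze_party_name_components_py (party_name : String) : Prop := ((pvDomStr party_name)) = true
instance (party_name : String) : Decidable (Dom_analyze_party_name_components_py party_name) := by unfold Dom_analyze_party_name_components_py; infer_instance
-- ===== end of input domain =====

-- B replaces A's two split() calls and three filtering comprehensions by a hand-written
-- character-level tokenizer that classifies each word into one of three buckets as soon
-- as a whitespace boundary ends it (objective: alternative, same output).

-- ===== PORT A =====
def pvBusinessTermsA : List String :=
  ["ltd", "limited", "pvt", "private", "company", "corp", "inc", "llp"]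

def analyze_party_name_components_py (party_name : String) : List (String × List String) :=
  let words := (PySem.Str.split₀ party_name).filter (fun w => !(pvBusinessTermsA.contains w))
  [("core_words", words.filter (fun w => decide (3 < PySem.Str.len w))),
   ("short_words", words.filter (fun w => decide (PySem.Str.len w ≤ 3))),
   ("business_type", (PySem.Str.split₀ party_name).filter (fun w => pvBusinessTermsA.contains w))]

-- ===== PORT B =====
-- B's business_terms is a Python set literal → PySem.Set
def pvBusinessTermsB : PySem.Set String :=
  PySem.Set.ofList ["ltd", "limited", "pvt", "private", "company", "corp", "inc", "llp"]

-- flush(chars): join the buffered chars into a word and append it to the right bucket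
def pvFlush (w : String) (st : List String × List String × List String) :
    List String × List String × List String :=
  if pvBusinessTermsB.contains w then (st.1, st.2.1, st.2.2 ++ [w])
  else if decide (3 < PySem.Str.len w) then (st.1 ++ [w], st.2.1, st.2.2)
  else (st.1, st.2.1 ++ [w], st.2.2)

-- the for-loop over the characters, with the trailing 'if word: flush(word)'
def pvScanB (s : List Char) (cur : List Char)
    (st : List String × List String × List String) :
    List String × List String × List String :=
  match s with
  | [] => if cur.isEmpty then st else pvFlush (String.ofList cur) st
  | c :: rest =>
    if PySem.Chars.isspace c then
      if cur.isEmpty then pvScanB rest [] st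
      else pvScanB rest [] (pvFlush (String.ofList cur) st)
    else pvScanB rest (cur ++ [c]) st

def analyze_party_name_components_py_alt (party_name : String) : List (String × List String) :=
  let r := pvScanB party_name.toList [] ([], [], [])
  [("core_words", r.1), ("short_words", r.2.1), ("business_type", r.2.2)]

-- ===== PRECONDITION & SPEC =====
def Spec_analyze_party_name_components_py (party_name : String) (out : List (String × List String)) : Prop := out = analyze_party_name_components_py_alt party_name
instance (party_name : String) (out : List (String × List String)) : Decidable (Spec_analyze_party_name_components_py party_name out) := by unfold Spec_analyze_party_name_components_py; infer_instance

-- ===== CLAIM (what is proved, stated in full; the proofs are below) =====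
def Claim_equal_analyze_party_name_components_py : Prop := ∀ (party_name : String), Dom_analyze_party_name_components_py party_name → Spec_analyze_party_name_components_py party_name (analyze_party_name_components_py party_name)

-- ===== LEMMAS AND PROOFS =====

theorem pvTerms_eq : pvBusinessTermsB = pvBusinessTermsA := by decide

-- split₀.go's accumulator just collects finished words front-to-back
theorem pvGo_acc (s : List Char) (cur : List Char) (acc : List (List Char)) :
    PySem.Chars.split₀.go s cur acc = acc.reverse ++ PySem.Chars.split₀.go s cur [] := by
  induction s generalizing cur acc with
  | nil => simp [PySem.Chars.split₀.go]; split_ifs <;> simp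
  | cons c rest ih =>
    simp only [PySem.Chars.split₀.go]
    split_ifs with hs he
    · exact ih [] acc
    · rw [ih [] (cur.reverse :: acc), ih [] [cur.reverse]]; simp
    · exact ih (c :: cur) acc

-- the character scan equals flushing every word split₀ finds, in order
theorem pvScan_eq_foldl (s : List Char) (cur : List Char)
    (st : List String × List String × List String) :
    pvScanB s cur st =
      (PySem.Chars.split₀.go s cur.reverse []).foldl
        (fun st w => pvFlush (String.ofList w) st) st := by
  induction s generalizing cur st with
  | nil =>
    simp only [pvScanB, PySem.Chars.split₀.go]
    by_cases h : cur = [] <;> simp [h]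
  | cons c rest ih =>
    simp only [pvScanB, PySem.Chars.split₀.go]
    by_cases hs : PySem.Chars.isspace c
    · by_cases h : cur = []
      · simpa [hs, h] using ih [] st
      · have : cur.reverse.isEmpty = false := by simp [h]
        simp only [hs, if_true, List.isEmpty_iff, h, if_false, this]
        rw [pvGo_acc rest [] [cur.reverse.reverse], ih [] (pvFlush (String.ofList cur) st)]
        simp
    · have h2 : (cur ++ [c]).reverse = c :: cur.reverse := by simp
      simpa [hs, h2] using ih (cur ++ [c]) st

-- flushing a list of words = the three filters of A
theorem pvFoldl_flush (ws : List String) (c s b : List String) :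
    ws.foldl (fun st w => pvFlush w st) (c, s, b) =
      (c ++ (ws.filter (fun w => !(pvBusinessTermsA.contains w))).filter
              (fun w => decide (3 < PySem.Str.len w)),
       s ++ (ws.filter (fun w => !(pvBusinessTermsA.contains w))).filter
              (fun w => decide (PySem.Str.len w ≤ 3)),
       b ++ ws.filter (fun w => pvBusinessTermsA.contains w)) := by
  induction ws generalizing c s b with
  | nil => simp
  | cons w ws ih =>
    rw [List.foldl_cons]
    by_cases hb : w ∈ pvBusinessTermsA
    · have hf : pvFlush w (c, s, b) = (c, s, b ++ [w]) := by
        simp [pvFlush, pvTerms_eq, hb]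
      rw [hf, ih]; simp [hb]
    · by_cases hl : 3 < w.length
      · have hle : ¬ w.length ≤ 3 := by omega
        have hf : pvFlush w (c, s, b) = (c ++ [w], s, b) := by
          simp [pvFlush, pvTerms_eq, hb, hl]
        rw [hf, ih]; simp [hb, hl, hle]
      · have hle : w.length ≤ 3 := by omega
        have hf : pvFlush w (c, s, b) = (c, s ++ [w], b) := by
          simp [pvFlush, pvTerms_eq, hb, hl]
        rw [hf, ih]; simp [hb, hl, hle]

-- ===== VERDICT (by name: the statement is the Claim_ definition above) =====
theorem analyze_party_name_components_py_spec : Claim_equal_analyze_party_name_components_py := by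
  intro party_name _
  unfold Spec_analyze_party_name_components_py
  unfold analyze_party_name_components_py analyze_party_name_components_py_alt
  rw [pvScan_eq_foldl]
  have hfold : ∀ (ws : List (List Char)) st,
      ws.foldl (fun st w => pvFlush (String.ofList w) st) st =
        (ws.map String.ofList).foldl (fun st w => pvFlush w st) st := by
    intro ws st; rw [List.foldl_map]
  rw [hfold, pvFoldl_flush]
  simp [PySem.Str.split₀, PySem.Chars.split₀]
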